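-- pv_equiv track=rewrite | github.com/soumyaaymous/eyeBlinkBehaviour | analysis/analyze_trial.py | find_zeros
-- ===== SOURCE A (Python) =====
-- def find_zeros( y ):
--     posEdge, negEdge = [], []
--     if y[0] < 0:
--         negEdge.append( 0 )
--     else:
--         posEdge.append( 0 )
--
--     for i, x in enumerate(y[1:]):
--         # y[i] is previous value if x in current value
--         if y[i] >= 0 and x < 0:
--             negEdge.append( i )
--         elif y[i] <= 0 and x > 0:
--             posEdge.append( i )
--     return (negEdge, posEdge)
-- ===== SOURCE B (Python) =====
-- def find_zeros(y):
--     # Run-length view: compress y into maximal runs of equal sign (-1, 0, +1).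
--     # Every negative run starting at position p > 0 is a negative edge recorded
--     # at p - 1, every positive run starting at p > 0 a positive edge at p - 1;
--     # index 0 is classified by the sign of y[0].
--     runs = []                      # [sign, length] of each maximal sign run
--     for v in y:
--         s = (v > 0) - (v < 0)
--         if runs and runs[-1][0] == s:
--             runs[-1][1] += 1
--         else:
--             runs.append([s, 1])
--     negEdge = [0] if y[0] < 0 else []
--     posEdge = [] if y[0] < 0 else [0]
--     pos = 0
--     for s, length in runs:
--         if pos > 0:
--             if s < 0:
--                 negEdge.append(pos - 1)
--             elif s > 0:
--                 posEdge.append(pos - 1)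
--         pos += length
--     return (negEdge, posEdge)
-- ===== Notes on version B (the rewrite author's own statement) =====
-- stated objective: alternative
-- what changed: Replaces A's pairwise scan (compare each element with its indexed predecessor y[i] and append on a sign crossing) by a run-length compression of the signal into maximal sign runs followed by a pass that emits the start position minus one of every nonzero-sign run after the first position; Pre_ excludes the empty list, on which A raises IndexError at y[0].
import Mathlib
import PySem

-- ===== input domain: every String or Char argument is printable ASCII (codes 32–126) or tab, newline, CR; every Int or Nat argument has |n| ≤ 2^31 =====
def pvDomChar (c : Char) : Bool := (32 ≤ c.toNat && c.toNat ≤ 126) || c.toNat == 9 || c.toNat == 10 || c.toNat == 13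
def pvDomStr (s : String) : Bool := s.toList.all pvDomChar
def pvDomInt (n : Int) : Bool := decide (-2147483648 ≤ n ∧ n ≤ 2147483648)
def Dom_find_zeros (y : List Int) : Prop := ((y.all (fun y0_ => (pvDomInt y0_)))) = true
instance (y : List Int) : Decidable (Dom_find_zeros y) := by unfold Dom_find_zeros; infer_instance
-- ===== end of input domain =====

-- B replaces A's pairwise predecessor-comparison scan by run-length compression of the
-- signal into maximal sign runs, then emits run-start positions minus one (alternative;
-- return value only).


-- ===== PORT A =====
-- y[0] and y[i] are always in range on the admitted inputs (y ≠ [], i < len y - 1),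
-- so the total pyGetD form is exact there.
def find_zeros (y : List Int) : List Int × List Int :=
  (PySem.List.enumerate (PySem.List.slice y (some 1) none)).foldl
    (fun s ix =>
      if PySem.List.pyGetD y ix.1 0 ≥ 0 ∧ ix.2 < 0 then (s.1 ++ [ix.1], s.2)
      else if PySem.List.pyGetD y ix.1 0 ≤ 0 ∧ ix.2 > 0 then (s.1, s.2 ++ [ix.1])
      else s)
    (if PySem.List.pyGetD y 0 0 < 0 then ([0], []) else ([], [0]))

-- ===== PORT B =====
-- s = (v > 0) - (v < 0)
def pvSgn (v : Int) : Int := (if v > 0 then (1 : Int) else 0) - (if v < 0 then (1 : Int) else 0)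

-- one iteration of B's run-building loop (runs[-1][1] += 1 is modelled as dropLast ++ [updated last])
def pvRunStep (rs : List (Int × Int)) (s : Int) : List (Int × Int) :=
  match rs.getLast? with
  | some last => if last.1 = s then rs.dropLast ++ [(last.1, last.2 + 1)] else rs ++ [(s, 1)]
  | none => rs ++ [(s, 1)]

-- one iteration of B's edge-emitting loop over the runs; state = ((negEdge, posEdge), pos)
def pvEdgeStep (st : (List Int × List Int) × Int) (r : Int × Int) : (List Int × List Int) × Int :=
  (if st.2 > 0 then
     (if r.1 < 0 then (st.1.1 ++ [st.2 - 1], st.1.2)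
      else if r.1 > 0 then (st.1.1, st.1.2 ++ [st.2 - 1])
      else st.1)
   else st.1,
   st.2 + r.2)

def find_zeros_alt (y : List Int) : List Int × List Int :=
  let runs := (y.map pvSgn).foldl pvRunStep []
  let init : List Int × List Int :=
    if PySem.List.pyGetD y 0 0 < 0 then ([0], []) else ([], [0])
  (runs.foldl pvEdgeStep (init, 0)).1

-- ===== PRECONDITION & SPEC =====
-- Pre_ excludes the empty list, on which A (and B) raises IndexError at y[0].
def Pre_find_zeros (y : List Int) : Prop := y ≠ []
instance (y : List Int) : Decidable (Pre_find_zeros y) := by unfold Pre_find_zeros; infer_instance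
def pvWitness_find_zeros : List Int := [1, -2, 0, 3]

def Spec_find_zeros (y : List Int) (out : List Int × List Int) : Prop := out = find_zeros_alt y
instance (y : List Int) (out : List Int × List Int) : Decidable (Spec_find_zeros y out) := by unfold Spec_find_zeros; infer_instance

-- ===== CLAIM (what is proved, stated in full; the proofs are below) =====
def Claim_equal_find_zeros : Prop := ∀ (y : List Int), Dom_find_zeros y → Pre_find_zeros y → Spec_find_zeros y (find_zeros y)

-- ===== LEMMAS AND PROOFS =====

-- the negative/positive edge index lists as filters over consecutive pairs (proof vocabulary)
def pvN (y : List Int) : List Int :=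
  ((PySem.List.enumerate (y.zip (y.drop 1)) 0).filter
    (fun ix => decide (ix.2.1 ≥ 0) && decide (ix.2.2 < 0))).map Prod.fst
def pvP (y : List Int) : List Int :=
  ((PySem.List.enumerate (y.zip (y.drop 1)) 0).filter
    (fun ix => decide (ix.2.1 ≤ 0) && decide (ix.2.2 > 0))).map Prod.fst

def pvSumLen (rs : List (Int × Int)) : Int := (rs.map Prod.snd).sum

-- A-side loop invariant: A's fold over enumerate(suffix, k) starting from accumulators (n, p)
-- appends exactly the filtered indices of the zipped suffix starting at k.
lemma find_zeros_loop (Y : List Int) :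
    ∀ (t : List Int) (k : Nat) (n p : List Int), Y.drop (k+1) = t →
      ((PySem.List.enumerate t (k : Int)).foldl
        (fun s ix =>
          if PySem.List.pyGetD Y ix.1 0 ≥ 0 ∧ ix.2 < 0 then (s.1 ++ [ix.1], s.2)
          else if PySem.List.pyGetD Y ix.1 0 ≤ 0 ∧ ix.2 > 0 then (s.1, s.2 ++ [ix.1])
          else s)
        (n, p))
      = (n ++ ((PySem.List.enumerate ((Y.drop k).zip t) (k : Int)).filter
            (fun ix => decide (ix.2.1 ≥ 0) && decide (ix.2.2 < 0))).map Prod.fst,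
         p ++ ((PySem.List.enumerate ((Y.drop k).zip t) (k : Int)).filter
            (fun ix => decide (ix.2.1 ≤ 0) && decide (ix.2.2 > 0))).map Prod.fst) := by
  intro t
  induction t with
  | nil =>
    intro k n p _
    simp [PySem.List.enumerate]
  | cons c rest ih =>
    intro k n p ht
    have hk1 : k + 1 ≤ Y.length := by
      by_contra h
      rw [List.drop_eq_nil_of_le (by omega)] at ht
      exact (List.cons_ne_nil c rest) ht.symm
    have hklt : k < Y.length := by omega
    have hdk : Y.drop k = Y[k] :: (c :: rest) := by
      rw [← ht, List.drop_eq_getElem_cons hklt]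
    have hget : PySem.List.pyGetD Y (k : Int) 0 = Y[k] := by
      simp [PySem.List.pyGetD_natCast, List.getD, List.getElem?_eq_getElem hklt]
    have hrest : Y.drop (k+1+1) = rest := by
      have h2 : Y.drop (k+1+1) = (Y.drop (k+1)).drop 1 := by rw [List.drop_drop]
      rw [h2, ht]; rfl
    have hcast : (k : Int) + 1 = ((k+1 : Nat) : Int) := by push_cast; ring
    rw [hdk]
    simp only [PySem.List.enumerate, List.zip_cons_cons, List.foldl_cons, List.filter_cons]
    rw [hcast]
    by_cases h1 : PySem.List.pyGetD Y (k : Int) 0 ≥ 0 ∧ c < 0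
    · rw [if_pos h1]
      rw [ih (k+1) (n ++ [(k : Int)]) p hrest, ht]
      have e1 : (decide (Y[k] ≥ 0) && decide (c < 0)) = true := by
        rw [hget] at h1; simp [h1.1, h1.2]
      have e2 : (decide (Y[k] ≤ 0) && decide (c > 0)) = false := by
        rw [hget] at h1; simp; intro _; omega
      simp [e1, e2]
    · rw [if_neg h1]
      by_cases h2 : PySem.List.pyGetD Y (k : Int) 0 ≤ 0 ∧ c > 0
      · rw [if_pos h2]
        rw [ih (k+1) n (p ++ [(k : Int)]) hrest, ht]
        have e1 : (decide (Y[k] ≥ 0) && decide (c < 0)) = false := by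
          rw [hget] at h2; simp; intro _; omega
        have e2 : (decide (Y[k] ≤ 0) && decide (c > 0)) = true := by
          rw [hget] at h2; simp [h2.1, h2.2]
        simp [e1, e2]
      · rw [if_neg h2]
        rw [ih (k+1) n p hrest, ht]
        have e1 : (decide (Y[k] ≥ 0) && decide (c < 0)) = false := by
          rw [hget] at h1; simp; intro ha; exact not_lt.mp (fun hb => h1 ⟨ha, hb⟩)
        have e2 : (decide (Y[k] ≤ 0) && decide (c > 0)) = false := by
          rw [hget] at h2; simp; intro ha; exact not_lt.mp (fun hb => h2 ⟨ha, hb⟩)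
        simp [e1, e2]

-- one run step adds exactly one to the total run length
lemma sumLen_runStep (rs : List (Int × Int)) (x : Int) :
    pvSumLen (pvRunStep rs x) = pvSumLen rs + 1 := by
  cases h : rs.getLast? with
  | none =>
    have hnil : rs = [] := List.getLast?_eq_none_iff.mp h
    subst hnil
    simp [pvRunStep, pvSumLen]
  | some last =>
    have hrs : rs.dropLast ++ [last] = rs := List.dropLast_append_getLast? last h
    by_cases he : last.1 = x
    · have hstep : pvRunStep rs x = rs.dropLast ++ [(last.1, last.2 + 1)] := by
        simp [pvRunStep, h, he]
      rw [hstep]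
      calc pvSumLen (rs.dropLast ++ [(last.1, last.2 + 1)])
          = pvSumLen rs.dropLast + (last.2 + 1) := by simp [pvSumLen]
        _ = pvSumLen rs + 1 := by
            rw [← hrs]; simp [pvSumLen]; ring
    · have hstep : pvRunStep rs x = rs ++ [(x, 1)] := by
        simp [pvRunStep, h, he]
      simp [hstep, pvSumLen]

lemma sumLen_runs (l : List Int) : pvSumLen (l.foldl pvRunStep []) = l.length := by
  induction l using List.reverseRecOn with
  | nil => simp [pvSumLen]
  | append_singleton l x ih =>
    rw [List.foldl_append]
    simp only [List.foldl_cons, List.foldl_nil]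
    rw [sumLen_runStep, ih]
    simp

-- the last run carries the last processed sign
lemma last_runStep (rs : List (Int × Int)) (x : Int) :
    ((pvRunStep rs x).getLast?).map Prod.fst = some x := by
  unfold pvRunStep
  cases h : rs.getLast? with
  | none => simp
  | some last =>
    by_cases he : last.1 = x
    · simp [he]
    · simp [he]

-- final pos after the edge loop = initial pos + total run length
lemma pos_edgeFold (rs : List (Int × Int)) :
    ∀ st : (List Int × List Int) × Int,
      (rs.foldl pvEdgeStep st).2 = st.2 + pvSumLen rs := by
  induction rs with
  | nil => intro st; simp [pvSumLen]
  | cons r rest ih =>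
    intro st
    rw [List.foldl_cons, ih]
    simp [pvEdgeStep, pvSumLen]; ring

-- the emitted edges do not depend on the LENGTH stored in the final run
lemma edges_ignore_last_len (dl : List (Int × Int)) (s' n m : Int)
    (st : (List Int × List Int) × Int) :
    ((dl ++ [(s', n)]).foldl pvEdgeStep st).1 = ((dl ++ [(s', m)]).foldl pvEdgeStep st).1 := by
  rw [List.foldl_append, List.foldl_append]
  simp [pvEdgeStep]

-- consecutive pairs of q ++ [b] = consecutive pairs of q plus the bridging pair
lemma zip_tail_snoc : ∀ (t : List Int) (a x : Int),
    (a :: (t ++ [x])).zip (t ++ [x]) = (a :: t).zip t ++ [((a :: t).getLastD 0, x)] := by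
  intro t
  induction t with
  | nil => intro a x; simp
  | cons b rest ih =>
    intro a x
    simp only [List.cons_append, List.zip_cons_cons]
    rw [ih b x]
    simp

-- MAIN B LEMMA: the run pipeline on z ++ [b] produces exactly the filtered pair indices
lemma runs_edges (z : List Int) : ∀ (b : Int) (st0 : List Int × List Int),
    (((z ++ [b]).map pvSgn).foldl pvRunStep []).foldl pvEdgeStep (st0, 0)
      = ((st0.1 ++ pvN (z ++ [b]), st0.2 ++ pvP (z ++ [b])), ((z ++ [b]).length : Int)) := by
  induction z using List.reverseRecOn with
  | nil =>
    intro b st0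
    by_cases hb : b > 0 <;> by_cases hb' : b < 0 <;>
      simp_all [pvRunStep, pvEdgeStep, pvSgn, pvN, pvP]
  | append_singleton z' w ih =>
    intro b st0
    -- notation
    set q : List Int := z' ++ [w] with hq
    have hmap : ((q ++ [b]).map pvSgn) = q.map pvSgn ++ [pvSgn b] := by simp
    have hR : ((q ++ [b]).map pvSgn).foldl pvRunStep []
        = pvRunStep ((q.map pvSgn).foldl pvRunStep []) (pvSgn b) := by
      rw [hmap, List.foldl_append]; rfl
    set R := (q.map pvSgn).foldl pvRunStep [] with hRdef
    have hlast : (R.getLast?).map Prod.fst = some (pvSgn w) := by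
      rw [hRdef]
      have : q.map pvSgn = z'.map pvSgn ++ [pvSgn w] := by simp [hq]
      rw [this, List.foldl_append]
      simp only [List.foldl_cons, List.foldl_nil]
      exact last_runStep _ _
    obtain ⟨lastR, hlR⟩ : ∃ lr, R.getLast? = some lr := by
      cases h : R.getLast? with
      | none => rw [h] at hlast; simp at hlast
      | some lr => exact ⟨lr, rfl⟩
    have hlfst : lastR.1 = pvSgn w := by rw [hlR] at hlast; simpa using hlast
    have hdrop : R.dropLast ++ [lastR] = R := List.dropLast_append_getLast? lastR hlR
    have hsumR : pvSumLen R = q.length := by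
      rw [hRdef]
      have h := sumLen_runs (q.map pvSgn)
      simpa using h
    -- pair-list decomposition of q ++ [b]
    have hqlast : q.getLastD 0 = w := by simp [hq]
    have hzip : (q ++ [b]).zip ((q ++ [b]).drop 1) = q.zip (q.drop 1) ++ [(w, b)] := by
      cases z' with
      | nil => simp [hq]
      | cons a t =>
        have h1 : (q ++ [b]).drop 1 = q.drop 1 ++ [b] := by simp [hq]
        rw [h1]
        have h2 : q = a :: (t ++ [w]) := by simp [hq]
        rw [h2]
        have h3 := zip_tail_snoc (t ++ [w]) a b
        simp only [List.cons_append, List.append_assoc, List.nil_append,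
          List.drop_succ_cons, List.drop_zero] at h3 ⊢
        rw [h3]
        have h4 : (a :: (t ++ [w])).getLastD 0 = w := by
          rw [show a :: (t ++ [w]) = (a :: t) ++ [w] from by simp, List.getLastD_concat]
        rw [h4]
    have hpairslen : (q.zip (q.drop 1)).length = z'.length := by
      simp [hq]
    have hNsnoc : pvN (q ++ [b])
        = pvN q ++ (if w ≥ 0 ∧ b < 0 then [(z'.length : Int)] else []) := by
      unfold pvN
      rw [hzip, PySem.List.enumerate_append, List.filter_append, List.map_append, hpairslen]
      congr 1
      by_cases hw : (0 : Int) ≤ w <;> by_cases hb : b < 0 <;>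
        simp [PySem.List.enumerate, hw, hb]
    have hPsnoc : pvP (q ++ [b])
        = pvP q ++ (if w ≤ 0 ∧ b > 0 then [(z'.length : Int)] else []) := by
      unfold pvP
      rw [hzip, PySem.List.enumerate_append, List.filter_append, List.map_append, hpairslen]
      congr 1
      by_cases hw : w ≤ 0 <;> by_cases hb : (0 : Int) < b <;>
        simp [PySem.List.enumerate, hw, hb]
    have hqlen : ((q ++ [b]).length : Int) = (q.length : Int) + 1 := by simp
    rw [hR]
    by_cases hsame : lastR.1 = pvSgn b
    · -- extend the last run: edge lists unchanged
      have hstep : pvRunStep R (pvSgn b) = R.dropLast ++ [(lastR.1, lastR.2 + 1)] := by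
        simp [pvRunStep, hlR, hsame]
      rw [hstep]
      have hedges : ((R.dropLast ++ [(lastR.1, lastR.2 + 1)]).foldl pvEdgeStep (st0, 0)).1
          = (R.foldl pvEdgeStep (st0, 0)).1 := by
        rw [edges_ignore_last_len R.dropLast lastR.1 (lastR.2 + 1) lastR.2, hdrop]
      have hpos : ((R.dropLast ++ [(lastR.1, lastR.2 + 1)]).foldl pvEdgeStep (st0, 0)).2
          = ((q ++ [b]).length : Int) := by
        rw [pos_edgeFold]
        have h1 : pvSumLen (R.dropLast ++ [(lastR.1, lastR.2 + 1)]) = pvSumLen R + 1 := by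
          rw [← hdrop]; simp [pvSumLen]; ring
        rw [h1, hsumR]; simp
      have hN : pvN (q ++ [b]) = pvN q := by
        rw [hNsnoc]
        have : ¬ (w ≥ 0 ∧ b < 0) := by
          intro ⟨hw, hb⟩
          rw [hlfst] at hsame
          simp [pvSgn] at hsame
          omega
        simp [this]
      have hP : pvP (q ++ [b]) = pvP q := by
        rw [hPsnoc]
        have : ¬ (w ≤ 0 ∧ b > 0) := by
          intro ⟨hw, hb⟩
          rw [hlfst] at hsame
          simp [pvSgn] at hsame
          omega
        simp [this]
      have hihq := ih w st0
      rw [← hq] at hihq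
      have h1 : (R.foldl pvEdgeStep (st0, 0)).1 = (st0.1 ++ pvN q, st0.2 ++ pvP q) := by
        rw [hRdef, hihq]
      refine Prod.ext ?_ ?_
      · rw [hedges, h1, hN, hP]
      · rw [hpos]
    · -- new run: one edge may be emitted at position q.length - 1 = z'.length
      have hstep : pvRunStep R (pvSgn b) = R ++ [(pvSgn b, 1)] := by
        simp [pvRunStep, hlR, hsame]
      rw [hstep, List.foldl_append]
      simp only [List.foldl_cons, List.foldl_nil]
      have hihq := ih w st0
      rw [← hq] at hihq
      rw [hRdef, hihq]
      have hqpos : (0 : Int) < q.length := by simp [hq]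
      have hqm1 : (q.length : Int) - 1 = (z'.length : Int) := by simp [hq]
      unfold pvEdgeStep
      simp only [if_pos hqpos]
      rw [hlfst] at hsame
      rcases lt_trichotomy b 0 with hb | hb | hb
      · have hsb : pvSgn b = -1 := by simp [pvSgn]; omega
        have hw0 : w ≥ 0 := by
          by_contra hw; apply hsame; simp [pvSgn]; omega
        have hb' : ¬ b > 0 := by omega
        simp [hNsnoc, hPsnoc, hsb, hqm1, hw0, hb, hb']
      · subst hb
        simp [hNsnoc, hPsnoc, pvSgn]
      · have hsb : pvSgn b = 1 := by simp [pvSgn]; omega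
        have hw0 : w ≤ 0 := by
          by_contra hw; apply hsame; simp [pvSgn]; omega
        have hb' : ¬ b < 0 := by omega
        simp [hNsnoc, hPsnoc, hsb, hqm1, hw0, hb, hb']

-- ===== VERDICT (by name: the statement is the Claim_ definition above) =====
theorem find_zeros_spec : Claim_equal_find_zeros := by
  intro y _ hpre
  unfold Spec_find_zeros
  obtain ⟨a, t, rfl⟩ := List.exists_cons_of_ne_nil hpre
  -- A side: filtered-pair form
  have hslice : PySem.List.slice (a :: t) (some 1) none = t := by
    rw [PySem.List.slice_from_one]; rfl
  have key := find_zeros_loop (a :: t) t 0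
  simp only [Nat.cast_zero, List.drop_zero] at key
  have hA : find_zeros (a :: t)
      = ((if PySem.List.pyGetD (a :: t) 0 0 < 0 then (([0] : List Int), ([] : List Int)) else ([], [0])).1
            ++ pvN (a :: t),
         (if PySem.List.pyGetD (a :: t) 0 0 < 0 then (([0] : List Int), ([] : List Int)) else ([], [0])).2
            ++ pvP (a :: t)) := by
    simp only [find_zeros, hslice]
    by_cases h0 : PySem.List.pyGetD (a :: t) 0 0 < 0
    · rw [if_pos h0, key [0] [] rfl]
      simp [pvN, pvP]
    · rw [if_neg h0, key [] [0] rfl]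
      simp [pvN, pvP]
  -- B side: run pipeline gives the same filtered-pair form
  obtain ⟨z, b, hzb⟩ := List.eq_nil_or_concat' (a :: t) |>.resolve_left (by simp)
  have hB : find_zeros_alt (a :: t)
      = ((if PySem.List.pyGetD (a :: t) 0 0 < 0 then (([0] : List Int), ([] : List Int)) else ([], [0])).1
            ++ pvN (a :: t),
         (if PySem.List.pyGetD (a :: t) 0 0 < 0 then (([0] : List Int), ([] : List Int)) else ([], [0])).2
            ++ pvP (a :: t)) := by
    simp only [find_zeros_alt]
    rw [hzb, runs_edges z b]
  rw [hA, hB]
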